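-- pv_equiv track=rewrite | github.com/shirinyamani/CTCI | chapter1/Solutions.py | inserted
-- ===== SOURCE A (Python) =====
-- def inserted(s1,s2):
--     i, j = 0, 0
--     while i < len(s1) and j < len(s2):
--         if s1[i] != s2[j]:
--             return False
--         else:
--             i += 1
--             j += 1
--     return True
-- ===== SOURCE B (Python) =====
-- def inserted(s1, s2):
--     n = min(len(s1), len(s2))
--     return s1[:n] == s2[:n]
-- ===== Notes on version B (the rewrite author's own statement) =====
-- stated objective: simpler
-- what changed: Replaces the lockstep index loop with early return by one min-length computation and a single slice-equality comparison.
import Mathlib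
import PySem

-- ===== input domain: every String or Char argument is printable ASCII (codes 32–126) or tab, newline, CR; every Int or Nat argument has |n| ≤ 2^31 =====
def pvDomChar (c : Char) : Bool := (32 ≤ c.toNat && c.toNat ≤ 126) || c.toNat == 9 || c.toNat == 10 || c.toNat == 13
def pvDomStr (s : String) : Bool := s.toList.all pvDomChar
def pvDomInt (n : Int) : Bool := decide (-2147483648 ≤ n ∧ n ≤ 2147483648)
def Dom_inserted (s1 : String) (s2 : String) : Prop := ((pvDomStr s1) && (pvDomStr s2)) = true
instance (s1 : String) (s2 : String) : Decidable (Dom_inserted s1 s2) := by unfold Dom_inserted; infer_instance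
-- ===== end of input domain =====

-- B changes A's lockstep character loop with early return into one min-length slice-equality comparison (simpler).

-- ===== PORT A =====
-- lockstep while loop: advance i and j together, return False on first mismatch
def insertedLoop (l1 l2 : List Char) : Bool :=
  match l1, l2 with
  | c1 :: t1, c2 :: t2 => if c1 ≠ c2 then false else insertedLoop t1 t2
  | _, _ => true

def inserted (s1 : String) (s2 : String) : Bool :=
  insertedLoop s1.toList s2.toList

-- ===== PORT B =====
def inserted_alt (s1 : String) (s2 : String) : Bool :=
  let n := min (PySem.Str.len s1) (PySem.Str.len s2)
  PySem.Str.slice s1 none (some n) == PySem.Str.slice s2 none (some n)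

-- ===== PRECONDITION & SPEC =====
def Spec_inserted (s1 : String) (s2 : String) (out : Bool) : Prop := out = inserted_alt s1 s2
instance (s1 : String) (s2 : String) (out : Bool) : Decidable (Spec_inserted s1 s2 out) := by unfold Spec_inserted; infer_instance

-- ===== CLAIM (what is proved, stated in full; the proofs are below) =====
def Claim_equal_inserted : Prop := ∀ (s1 : String) (s2 : String), Dom_inserted s1 s2 → Spec_inserted s1 s2 (inserted s1 s2)

-- ===== LEMMAS AND PROOFS =====
theorem insertedLoop_eq_take (l1 l2 : List Char) :
    insertedLoop l1 l2 = (l1.take (min l1.length l2.length) == l2.take (min l1.length l2.length)) := by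
  induction l1 generalizing l2 with
  | nil => cases l2 <;> simp [insertedLoop]
  | cons c1 t1 ih =>
    cases l2 with
    | nil => simp [insertedLoop]
    | cons c2 t2 =>
      by_cases h : c1 = c2 <;>
        simp [insertedLoop, h, ih t2]

-- ===== VERDICT (by name: the statement is the Claim_ definition above) =====
theorem inserted_spec : Claim_equal_inserted := by
  intro s1 s2 _
  unfold Spec_inserted inserted inserted_alt
  simp only []
  rw [insertedLoop_eq_take]
  have h : ∀ a b : String, (a == b) = (a.toList == b.toList) := by
    intro a b
    rw [Bool.eq_iff_iff]
    simp only [beq_iff_eq]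
    exact ⟨congrArg _, fun h => String.toList_injective h⟩
  rw [h _ _]
  have hn : min (PySem.Str.len s1) (PySem.Str.len s2)
      = ((min s1.toList.length s2.toList.length : Nat) : Int) := by
    simp [PySem.Str.len_eq, Nat.cast_min]
  have hs : ∀ (s : String) (n : Nat),
      (PySem.Str.slice s none (some (n : Int))).toList = s.toList.take n := by
    intro s n; simp [PySem.Str.slice]
  rw [hn, hs, hs]
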